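-- pv_equiv track=rewrite | github.com/theseven7h/PhaseGateOne | Python/studentgrade.py | get_lowest_scores
-- ===== SOURCE A (Python) =====
-- def get_lowest_scores(student_scores):
-- 	lowest_scores = [0] * len(student_scores[0])
-- 	index = [0] * len(student_scores[0])
-- 	for i in range(len(student_scores[0])):
-- 		lowest_scores[i] = student_scores[0][i]
-- 		index[i] = 1
-- 		for j in range(len(student_scores)):
-- 			if student_scores[j][i] < lowest_scores[i]:
-- 				lowest_scores[i] = student_scores[j][i]
-- 				index[i] = j + 1
-- 	return [lowest_scores,index]
-- ===== SOURCE B (Python) =====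
-- def get_lowest_scores(student_scores):
--     ncols = len(student_scores[0])
--     lows = []
--     idx = []
--     for i in range(ncols):
--         col = [row[i] for row in student_scores]
--         m = min(col)
--         lows.append(m)
--         idx.append(col.index(m) + 1)
--     return [lows, idx]
-- ===== Notes on version B (the rewrite author's own statement) =====
-- stated objective: simpler
-- what changed: Replaces A's preallocated arrays and hand-rolled min-tracking inner scan with, per column, an explicitly materialized column list and the library min / first-occurrence index passes.
import Mathlib
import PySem

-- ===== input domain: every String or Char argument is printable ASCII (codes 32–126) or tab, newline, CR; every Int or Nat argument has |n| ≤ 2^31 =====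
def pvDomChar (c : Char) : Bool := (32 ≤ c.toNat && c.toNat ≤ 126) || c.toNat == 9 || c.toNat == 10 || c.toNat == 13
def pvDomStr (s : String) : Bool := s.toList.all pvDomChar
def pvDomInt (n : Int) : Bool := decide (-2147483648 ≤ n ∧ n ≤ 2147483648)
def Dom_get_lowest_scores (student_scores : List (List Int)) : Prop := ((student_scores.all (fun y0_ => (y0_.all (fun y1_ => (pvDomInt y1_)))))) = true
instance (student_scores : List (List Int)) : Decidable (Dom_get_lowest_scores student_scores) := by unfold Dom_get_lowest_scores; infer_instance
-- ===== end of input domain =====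

-- B replaces A's hand-rolled min-tracking inner scan with per-column library min / first-index passes (objective: simpler).

-- ===== PORT A =====
def get_lowest_scores (student_scores : List (List Int)) : List (List Int) :=
  let res := (PySem.List.pyRange 0 (PySem.List.len (PySem.List.pyGetD student_scores 0 [])) 1).foldl
    (fun (acc : List Int × List Int) i =>
      let st := (PySem.List.pyRange 0 (PySem.List.len student_scores) 1).foldl
        (fun (st : Int × Int) j =>
          if PySem.List.pyGetD (PySem.List.pyGetD student_scores j []) i 0 < st.1
          then (PySem.List.pyGetD (PySem.List.pyGetD student_scores j []) i 0, j + 1)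
          else st)
        (PySem.List.pyGetD (PySem.List.pyGetD student_scores 0 []) i 0, 1)
      (acc.1 ++ [st.1], acc.2 ++ [st.2]))
    ([], [])
  [res.1, res.2]

-- ===== PORT B =====
def get_lowest_scores_alt (student_scores : List (List Int)) : List (List Int) :=
  let res := (PySem.List.pyRange 0 (PySem.List.len (PySem.List.pyGetD student_scores 0 [])) 1).foldl
    (fun (acc : List Int × List Int) i =>
      let col := student_scores.map (fun row => PySem.List.pyGetD row i 0)
      let m := (PySem.List.min? col (fun y => y)).getD 0
      (acc.1 ++ [m], acc.2 ++ [(((PySem.List.index? col m).getD 0 : Nat) : Int) + 1]))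
    ([], [])
  [res.1, res.2]

-- ===== PRECONDITION & SPEC =====
-- Pre_ excludes exactly the inputs where Python A raises: the empty list (IndexError on
-- student_scores[0]) and ragged inputs where some row is shorter than row 0 (IndexError inside the scan).
def Pre_get_lowest_scores (student_scores : List (List Int)) : Prop :=
  student_scores ≠ [] ∧ ∀ row ∈ student_scores, (student_scores.headD []).length ≤ row.length
instance (student_scores : List (List Int)) : Decidable (Pre_get_lowest_scores student_scores) := by unfold Pre_get_lowest_scores; infer_instance
def pvWitness_get_lowest_scores : List (List Int) := [[3, 2], [1, 5], [1, 0]]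
def Spec_get_lowest_scores (student_scores : List (List Int)) (out : List (List Int)) : Prop := out = get_lowest_scores_alt student_scores
instance (student_scores : List (List Int)) (out : List (List Int)) : Decidable (Spec_get_lowest_scores student_scores out) := by unfold Spec_get_lowest_scores; infer_instance

-- ===== CLAIM (what is proved, stated in full; the proofs are below) =====
def Claim_equal_get_lowest_scores : Prop := ∀ (student_scores : List (List Int)), Dom_get_lowest_scores student_scores → Pre_get_lowest_scores student_scores → Spec_get_lowest_scores student_scores (get_lowest_scores student_scores)

-- ===== LEMMAS AND PROOFS =====

-- enumeration of a mapped list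
theorem pv_enum_map {α β : Type} (xs : List α) (f : α → β) (s : Int) :
    PySem.List.enumerate (xs.map f) s = (PySem.List.enumerate xs s).map (fun p => (p.1, f p.2)) := by
  induction xs generalizing s with
  | nil => simp [PySem.List.enumerate_nil]
  | cons x t ih => simp [PySem.List.enumerate_cons, ih]

-- A's min-tracking scan over an enumerated column computes the running minimum and
-- (1-based, offset s) first index of the minimum when it improves on the start value.
theorem pv_scan (col : List Int) (s cur ci : Int) :
    (PySem.List.enumerate col s).foldl
      (fun (st : Int × Int) p => if p.2 < st.1 then (p.2, p.1 + 1) else st) (cur, ci)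
    = if col.foldl min cur < cur
      then (col.foldl min cur, s + (((PySem.List.index? col (col.foldl min cur)).getD 0 : Nat) : Int) + 1)
      else (cur, ci) := by
  induction col generalizing s cur ci with
  | nil => simp
  | cons c rest ih =>
    rw [PySem.List.enumerate_cons, List.foldl_cons]
    by_cases hc : c < cur
    · simp only [if_pos hc]
      rw [ih]
      have hmin : min cur c = c := min_eq_right (le_of_lt hc)
      simp only [List.foldl_cons, hmin]
      by_cases hm : rest.foldl min c < c
      · have hmem : rest.foldl min c ∈ rest := by
          rcases PySem.List.foldl_min_mem rest c with h | h
          · exact absurd h (by intro h'; rw [h'] at hm; exact lt_irrefl _ hm)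
          · exact h
        have hne : c ≠ rest.foldl min c := fun h => absurd hm (by rw [← h]; exact lt_irrefl _)
        have hlt : rest.foldl min c < cur := lt_trans hm hc
        rw [if_pos hm, if_pos hlt, PySem.List.index?_cons_of_ne _ hne]
        obtain ⟨k, hk⟩ := Option.isSome_iff_exists.mp ((PySem.List.index?_isSome_iff rest _).mpr hmem)
        rw [hk]
        simp only [Option.map_some, Option.getD_some, Prod.mk.injEq]
        exact ⟨trivial, by push_cast; ring⟩
      · have heq : rest.foldl min c = c :=
          le_antisymm (PySem.List.foldl_min_le rest c).1 (not_lt.mp hm)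
        rw [if_neg hm, heq, if_pos hc, PySem.List.index?_cons_self]
        simp
    · simp only [if_neg hc]
      rw [ih]
      have hmin : min cur c = cur := min_eq_left (not_lt.mp hc)
      simp only [List.foldl_cons, hmin]
      by_cases hm : rest.foldl min cur < cur
      · have hmem : rest.foldl min cur ∈ rest := by
          rcases PySem.List.foldl_min_mem rest cur with h | h
          · exact absurd h (by intro h'; rw [h'] at hm; exact lt_irrefl _ hm)
          · exact h
        have hne : c ≠ rest.foldl min cur :=
          fun h => hc (h ▸ hm)
        rw [if_pos hm, if_pos hm, PySem.List.index?_cons_of_ne _ hne]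
        obtain ⟨k, hk⟩ := Option.isSome_iff_exists.mp ((PySem.List.index?_isSome_iff rest _).mpr hmem)
        rw [hk]
        simp only [Option.map_some, Option.getD_some, Prod.mk.injEq]
        exact ⟨trivial, by push_cast; ring⟩
      · rw [if_neg hm, if_neg hm]

-- per-column agreement of the two step computations
theorem pv_col (student_scores : List (List Int)) (i : Int) :
    ((PySem.List.pyRange 0 (PySem.List.len student_scores) 1).foldl
        (fun (st : Int × Int) j =>
          if PySem.List.pyGetD (PySem.List.pyGetD student_scores j []) i 0 < st.1
          then (PySem.List.pyGetD (PySem.List.pyGetD student_scores j []) i 0, j + 1)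
          else st)
        (PySem.List.pyGetD (PySem.List.pyGetD student_scores 0 []) i 0, 1))
    = ((PySem.List.min? (student_scores.map (fun row => PySem.List.pyGetD row i 0)) (fun y => y)).getD 0,
       (((PySem.List.index? (student_scores.map (fun row => PySem.List.pyGetD row i 0))
            ((PySem.List.min? (student_scores.map (fun row => PySem.List.pyGetD row i 0)) (fun y => y)).getD 0)).getD 0 : Nat) : Int) + 1) := by
  have hfold :
      (PySem.List.pyRange 0 (PySem.List.len student_scores) 1).foldl
        (fun (st : Int × Int) j =>
          if PySem.List.pyGetD (PySem.List.pyGetD student_scores j []) i 0 < st.1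
          then (PySem.List.pyGetD (PySem.List.pyGetD student_scores j []) i 0, j + 1)
          else st)
        (PySem.List.pyGetD (PySem.List.pyGetD student_scores 0 []) i 0, 1)
      = (PySem.List.enumerate (student_scores.map (fun row => PySem.List.pyGetD row i 0)) 0).foldl
          (fun (st : Int × Int) p => if p.2 < st.1 then (p.2, p.1 + 1) else st)
          (PySem.List.pyGetD (PySem.List.pyGetD student_scores 0 []) i 0, 1) := by
    rw [pv_enum_map, PySem.List.enumerate_eq_map_pyRange (d := []), List.foldl_map, List.foldl_map]
  rw [hfold, pv_scan]
  cases student_scores with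
  | nil => simp [PySem.List.pyGetD, PySem.List.pyGet?, PySem.List.min?, PySem.List.index?]
  | cons r rest =>
    have hr0 : PySem.List.pyGetD (r :: rest) 0 [] = r := by
      simp [PySem.List.pyGetD, PySem.List.pyGet?, PySem.List.pyIdx?]
    rw [hr0]
    simp only [List.map_cons, PySem.List.min?_id_cons, Option.getD_some, List.foldl_cons,
      min_self]
    by_cases hm : (rest.map (fun row => PySem.List.pyGetD row i 0)).foldl min (PySem.List.pyGetD r i 0) < PySem.List.pyGetD r i 0
    · rw [if_pos hm]
      simp
    · rw [if_neg hm]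
      have heq : (rest.map (fun row => PySem.List.pyGetD row i 0)).foldl min (PySem.List.pyGetD r i 0) = PySem.List.pyGetD r i 0 :=
        le_antisymm (PySem.List.foldl_min_le _ _).1 (not_lt.mp hm)
      rw [heq, PySem.List.index?_cons_self]
      simp

-- ===== VERDICT (by name: the statement is the Claim_ definition above) =====
theorem get_lowest_scores_spec : Claim_equal_get_lowest_scores := by
  intro student_scores _ _
  unfold Spec_get_lowest_scores get_lowest_scores get_lowest_scores_alt
  have h : ∀ (l : List Int) (acc : List Int × List Int),
      l.foldl
        (fun (acc : List Int × List Int) i =>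
          let st := (PySem.List.pyRange 0 (PySem.List.len student_scores) 1).foldl
            (fun (st : Int × Int) j =>
              if PySem.List.pyGetD (PySem.List.pyGetD student_scores j []) i 0 < st.1
              then (PySem.List.pyGetD (PySem.List.pyGetD student_scores j []) i 0, j + 1)
              else st)
            (PySem.List.pyGetD (PySem.List.pyGetD student_scores 0 []) i 0, 1)
          (acc.1 ++ [st.1], acc.2 ++ [st.2])) acc
      = l.foldl
        (fun (acc : List Int × List Int) i =>
          let col := student_scores.map (fun row => PySem.List.pyGetD row i 0)
          let m := (PySem.List.min? col (fun y => y)).getD 0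
          (acc.1 ++ [m], acc.2 ++ [(((PySem.List.index? col m).getD 0 : Nat) : Int) + 1])) acc := by
    intro l
    induction l with
    | nil => intro acc; rfl
    | cons i t ih =>
      intro acc
      simp only [List.foldl_cons]
      rw [ih]
      congr 1
      simp only [pv_col student_scores i]
  rw [h]
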